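-- pv_equiv track=rewrite | github.com/TangyRyan/WeiBo_Latest | spider/aicard_parser.py | _join_markdown_lines
-- ===== SOURCE A (Python) =====
-- from typing import Any, List, Mapping, Optional, Sequence, Tuple
--
-- def _join_markdown_lines(lines: Sequence[str]) -> str:
--     cleaned: List[str] = []
--     previous_blank = True
--     for raw in lines:
--         if raw is None:
--             continue
--         line = raw.rstrip()
--         if not line:
--             if not previous_blank and cleaned:
--                 cleaned.append("")
--             previous_blank = True
--             continue
--         cleaned.append(line)
--         previous_blank = False
--     while cleaned and cleaned[-1] == "":
--         cleaned.pop()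
--     return "\n".join(cleaned)
-- ===== SOURCE B (Python) =====
-- from itertools import groupby
--
-- def _join_markdown_lines(lines):
--     normalized = [line.rstrip() for line in lines if line is not None]
--     blocks = ("\n".join(group) for blank, group in groupby(normalized, key=lambda l: not l) if not blank)
--     return "\n\n".join(blocks)
-- ===== Notes on version B (the rewrite author's own statement) =====
-- stated objective: idiomatic
-- what changed: Replaces A's single stateful pass (previous_blank flag, conditional separator insertion, trailing-blank pop loop) by a staged pipeline: normalize lines, group consecutive non-blank lines into blocks with itertools.groupby, join blocks with '\n' and join the block list with '\n\n'.
import Mathlib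
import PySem

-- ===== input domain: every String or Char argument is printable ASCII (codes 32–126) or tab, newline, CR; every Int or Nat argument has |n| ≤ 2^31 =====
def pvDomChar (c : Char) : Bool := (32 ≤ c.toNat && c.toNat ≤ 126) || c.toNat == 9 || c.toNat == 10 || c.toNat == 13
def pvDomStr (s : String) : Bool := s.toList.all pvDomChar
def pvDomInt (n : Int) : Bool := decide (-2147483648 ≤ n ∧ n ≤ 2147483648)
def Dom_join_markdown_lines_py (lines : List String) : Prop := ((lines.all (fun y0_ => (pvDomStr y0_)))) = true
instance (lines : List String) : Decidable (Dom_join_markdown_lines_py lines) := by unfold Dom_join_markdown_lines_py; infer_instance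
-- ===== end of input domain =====

-- B groups normalized lines into blocks of consecutive non-blank lines (an itertools.groupby
-- pipeline) instead of A's stateful flag-driven pass; same cost, more idiomatic.

-- ===== PORT A =====
-- Python's 'while cleaned and cleaned[-1] == "": cleaned.pop()' — drop the trailing run of "".
def pvDropTrailBlank : List String → List String
  | [] => []
  | x :: xs =>
    let t := pvDropTrailBlank xs
    if t = [] then (if x = "" then [] else [x]) else x :: t

-- the 'for raw in lines' loop over state (cleaned, previous_blank); the 'raw is None'
-- branch cannot fire: every element of a List String is a string.
def pvALoop : List String → List String → Bool → List String
  | [], cleaned, _ => cleaned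
  | raw :: rest, cleaned, previous_blank =>
    let line := PySem.Str.rstrip raw
    if line = "" then
      if previous_blank = false ∧ cleaned ≠ [] then pvALoop rest (cleaned ++ [""]) true
      else pvALoop rest cleaned true
    else pvALoop rest (cleaned ++ [line]) false

def join_markdown_lines_py (lines : List String) : String :=
  PySem.Str.join "\n" (pvDropTrailBlank (pvALoop lines [] true))

-- ===== PORT B =====
-- groupby(normalized, key=lambda l: not l), keeping the non-blank groups:
-- a blank head is skipped, a non-blank head opens a block of the consecutive non-blank lines.
def pvBlocks : List String → List (List String)
  | [] => []
  | x :: xs =>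
    if x = "" then pvBlocks xs
    else (x :: xs.takeWhile (· ≠ "")) :: pvBlocks (xs.dropWhile (· ≠ ""))
termination_by l => l.length
decreasing_by
  · simp
  · exact Nat.lt_succ_of_le (List.length_dropWhile_le _ _)

def join_markdown_lines_py_alt (lines : List String) : String :=
  let normalized := lines.map PySem.Str.rstrip
  PySem.Str.join "\n\n" ((pvBlocks normalized).map (PySem.Str.join "\n"))

-- ===== PRECONDITION & SPEC =====
def Spec_join_markdown_lines_py (lines : List String) (out : String) : Prop := out = join_markdown_lines_py_alt lines
instance (lines : List String) (out : String) : Decidable (Spec_join_markdown_lines_py lines out) := by unfold Spec_join_markdown_lines_py; infer_instance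

-- ===== CLAIM (what is proved, stated in full; the proofs are below) =====
def Claim_equal_join_markdown_lines_py : Prop := ∀ (lines : List String), Dom_join_markdown_lines_py lines → Spec_join_markdown_lines_py lines (join_markdown_lines_py lines)

-- ===== LEMMAS AND PROOFS =====

-- what A's loop computes on the normalized lines, split by the previous_blank state
mutual
def pvN : List String → List String
  | [] => []
  | x :: xs => if x = "" then pvN xs else x :: pvFb xs
def pvFb : List String → List String
  | [] => []
  | x :: xs => if x = "" then "" :: pvN xs else x :: pvFb xs
end

-- blocks interleaved with single "" separators
def pvSep : List (List String) → List String
  | [] => []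
  | [b] => b
  | b :: b' :: bs => b ++ "" :: pvSep (b' :: bs)

theorem pvALoop_char (ls : List String) : ∀ c : List String,
    pvALoop ls c true = c ++ pvN (ls.map PySem.Str.rstrip) ∧
    (c ≠ [] → pvALoop ls c false = c ++ pvFb (ls.map PySem.Str.rstrip)) := by
  induction ls with
  | nil => intro c; simp [pvALoop, pvN, pvFb]
  | cons x ls ih =>
    intro c
    by_cases h : PySem.Str.rstrip x = ""
    · constructor
      · rw [show pvALoop (x :: ls) c true = pvALoop ls c true from by simp [pvALoop, h]]
        rw [(ih c).1]; simp [pvN, h]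
      · intro hc
        rw [show pvALoop (x :: ls) c false = pvALoop ls (c ++ [""]) true from by
          simp [pvALoop, h, hc]]
        rw [(ih (c ++ [""])).1]; simp [pvFb, h]
    · constructor
      · rw [show pvALoop (x :: ls) c true = pvALoop ls (c ++ [PySem.Str.rstrip x]) false from by
          simp [pvALoop, h]]
        rw [(ih (c ++ [PySem.Str.rstrip x])).2 (by simp)]; simp [pvN, h]
      · intro _
        rw [show pvALoop (x :: ls) c false = pvALoop ls (c ++ [PySem.Str.rstrip x]) false from by
          simp [pvALoop, h]]
        rw [(ih (c ++ [PySem.Str.rstrip x])).2 (by simp)]; simp [pvFb, h]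

theorem pvBlocks_ne_nil (ns : List String) : ∀ b ∈ pvBlocks ns, b ≠ [] := by
  induction ns using pvBlocks.induct with
  | case1 => simp [pvBlocks]
  | case2 xs ih => simpa [pvBlocks] using ih
  | case3 x xs h ih =>
    intro b hb
    rw [show pvBlocks (x :: xs) =
          (x :: xs.takeWhile (· ≠ "")) :: pvBlocks (xs.dropWhile (· ≠ "")) from by
      simp [pvBlocks, h]] at hb
    rcases List.mem_cons.mp hb with hb | hb
    · simp [hb]
    · exact ih b hb

theorem pvSep_cons_ne_nil (b : List String) (bs : List (List String)) (hb : b ≠ []) :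
    pvSep (b :: bs) ≠ [] := by
  cases bs with
  | nil => simpa [pvSep]
  | cons b' bs => cases b with
    | nil => exact absurd rfl hb
    | cons s t => simp [pvSep]

-- the core invariant: drop-trailing-blanks of A's accumulated list = blocks with "" separators
theorem pvMain (ns : List String) :
    pvDropTrailBlank (pvN ns) = pvSep (pvBlocks ns) ∧
    pvDropTrailBlank (pvFb ns) =
      ns.takeWhile (· ≠ "") ++
        (if pvBlocks (ns.dropWhile (· ≠ "")) = [] then []
         else "" :: pvSep (pvBlocks (ns.dropWhile (· ≠ "")))) := by
  induction ns with
  | nil => simp [pvN, pvFb, pvDropTrailBlank, pvBlocks, pvSep]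
  | cons x xs ih =>
    by_cases h : x = ""
    · subst h
      constructor
      · rw [show pvN ("" :: xs) = pvN xs from by simp [pvN],
            show pvBlocks ("" :: xs) = pvBlocks xs from by simp [pvBlocks]]
        exact ih.1
      · rw [show pvFb ("" :: xs) = "" :: pvN xs from by simp [pvFb]]
        rw [show pvDropTrailBlank (("" : String) :: pvN xs) =
              (if pvDropTrailBlank (pvN xs) = [] then []
               else "" :: pvDropTrailBlank (pvN xs)) from by
          simp only [pvDropTrailBlank]
          by_cases ht : pvDropTrailBlank (pvN xs) = [] <;> simp [ht]]
        rw [ih.1]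
        rw [show List.takeWhile (fun l => decide (l ≠ "")) (("" : String) :: xs) = [] from by simp,
            show List.dropWhile (fun l => decide (l ≠ "")) (("" : String) :: xs) = "" :: xs from by
              simp,
            show pvBlocks (("" : String) :: xs) = pvBlocks xs from by simp [pvBlocks]]
        by_cases hB : pvBlocks xs = []
        · simp [hB, pvSep]
        · rcases hne : pvBlocks xs with _ | ⟨b, bs⟩
          · exact absurd hne hB
          · have hbne : b ≠ [] := pvBlocks_ne_nil xs b (by rw [hne]; simp)
            have hsep : pvSep (b :: bs) ≠ [] := pvSep_cons_ne_nil b bs hbne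
            simp [hsep]
    · have hx : ∀ t : List String, pvDropTrailBlank (x :: t) = x :: pvDropTrailBlank t := by
        intro t
        simp only [pvDropTrailBlank]
        by_cases ht : pvDropTrailBlank t = [] <;> simp [ht, h]
      constructor
      · rw [show pvN (x :: xs) = x :: pvFb xs from by simp [pvN, h]]
        rw [hx, ih.2]
        rw [show pvBlocks (x :: xs) =
              (x :: xs.takeWhile (· ≠ "")) :: pvBlocks (xs.dropWhile (· ≠ "")) from by
          simp [pvBlocks, h]]
        rcases hne : pvBlocks (xs.dropWhile (· ≠ "")) with _ | ⟨b, bs⟩ <;> simp [pvSep]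
      · rw [show pvFb (x :: xs) = x :: pvFb xs from by simp [pvFb, h]]
        rw [hx, ih.2]
        simp [h]

-- joining at Chars level: join over an append of nonempty lists
theorem pvJoinAppend (sep : List Char) (u w : List (List Char)) (hu : u ≠ []) (hw : w ≠ []) :
    PySem.Chars.join sep (u ++ w) = PySem.Chars.join sep u ++ sep ++ PySem.Chars.join sep w := by
  induction u with
  | nil => exact absurd rfl hu
  | cons a u ihu =>
    cases u with
    | nil =>
      cases w with
      | nil => exact absurd rfl hw
      | cons b w => simp [PySem.Chars.join_cons_cons, PySem.Chars.join_singleton]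
    | cons a' u' =>
      have h1 : PySem.Chars.join sep ((a :: a' :: u') ++ w)
          = a ++ sep ++ PySem.Chars.join sep ((a' :: u') ++ w) := by
        simpa [List.append_assoc] using PySem.Chars.join_cons_cons sep a a' (u' ++ w)
      rw [h1, ihu (by simp), PySem.Chars.join_cons_cons]
      simp [List.append_assoc]

-- '\n'.join of blocks separated by "" = '\n\n'.join of the per-block '\n'.joins
theorem pvJoinSep (bs : List (List String)) (hbs : ∀ b ∈ bs, b ≠ []) :
    PySem.Str.join "\n" (pvSep bs) = PySem.Str.join "\n\n" (bs.map (PySem.Str.join "\n")) := by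
  induction bs with
  | nil =>
    rw [← String.toList_inj]
    simp [pvSep, PySem.Str.toList_join, PySem.Chars.join_nil]
  | cons b bs ih =>
    cases bs with
    | nil =>
      rw [← String.toList_inj]
      simp [pvSep, PySem.Str.toList_join, PySem.Chars.join_singleton]
    | cons b' bs' =>
      have hb : b ≠ [] := hbs b (by simp)
      have hb' : b' ≠ [] := hbs b' (by simp)
      have hrest : ∀ x ∈ b' :: bs', x ≠ [] := fun x hx => hbs x (by simp [hx])
      have ihr := ih hrest
      rw [← String.toList_inj] at ihr ⊢
      simp only [PySem.Str.toList_join, List.map_map, List.map_cons] at ihr ⊢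
      rw [show pvSep (b :: b' :: bs') = b ++ "" :: pvSep (b' :: bs') from by simp [pvSep]]
      rw [List.map_append]
      have hu : List.map String.toList b ≠ [] := by simpa using hb
      rw [pvJoinAppend _ _ _ hu (by simp)]
      rcases hm : List.map String.toList (pvSep (b' :: bs')) with _ | ⟨s, t⟩
      · exact absurd (by simpa using hm) (pvSep_cons_ne_nil b' bs' hb')
      · rw [List.map_cons, hm]
        rw [show ("" : String).toList = ([] : List Char) from rfl]
        rw [PySem.Chars.join_cons_cons]
        rw [hm] at ihr
        rw [ihr, PySem.Chars.join_cons_cons]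
        rw [show ("\n\n" : String).toList = ("\n" : String).toList ++ ("\n" : String).toList from rfl]
        simp [List.append_assoc]

-- ===== VERDICT (by name: the statement is the Claim_ definition above) =====
theorem join_markdown_lines_py_spec : Claim_equal_join_markdown_lines_py := by
  intro lines _
  unfold Spec_join_markdown_lines_py join_markdown_lines_py join_markdown_lines_py_alt
  rw [(pvALoop_char lines []).1, List.nil_append, (pvMain (lines.map PySem.Str.rstrip)).1]
  exact pvJoinSep _ (pvBlocks_ne_nil _)
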